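-- pv_equiv track=rewrite | github.com/danielgavrila2/FOL-Bus-Trip-Planner | src/backend/services/path_finder.py | count_transfers
-- ===== SOURCE A (Python) =====
-- from typing import List, Dict, Optional
--
-- def count_transfers(path: List[Dict]) -> int:
--     """Count number of transfers in a path"""
--     if not path:
--         return 0
--
--     transfers = 0
--     current_route = path[0]["route"]
--
--     for segment in path[1:]:
--         if segment["route"] != current_route:
--             transfers += 1
--             current_route = segment["route"]
--
--     return transfers
-- ===== SOURCE B (Python) =====
-- def count_transfers(path):
--     """Count number of transfers in a path"""
--     routes = [segment["route"] for segment in path]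
--
--     def solve(lo, hi):
--         # number of transfers within routes[lo:hi]
--         if hi - lo < 2:
--             return 0
--         mid = (lo + hi) // 2
--         boundary = 1 if routes[mid] != routes[mid - 1] else 0
--         return solve(lo, mid) + solve(mid, hi) + boundary
--
--     return solve(0, len(routes))
-- ===== Notes on version B (the rewrite author's own statement) =====
-- stated objective: alternative
-- what changed: B extracts the route list once and counts transfers by divide and conquer on index ranges (left half + right half + one midpoint boundary check), instead of A's left-to-right scan with a running current_route and counter.
import Mathlib
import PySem

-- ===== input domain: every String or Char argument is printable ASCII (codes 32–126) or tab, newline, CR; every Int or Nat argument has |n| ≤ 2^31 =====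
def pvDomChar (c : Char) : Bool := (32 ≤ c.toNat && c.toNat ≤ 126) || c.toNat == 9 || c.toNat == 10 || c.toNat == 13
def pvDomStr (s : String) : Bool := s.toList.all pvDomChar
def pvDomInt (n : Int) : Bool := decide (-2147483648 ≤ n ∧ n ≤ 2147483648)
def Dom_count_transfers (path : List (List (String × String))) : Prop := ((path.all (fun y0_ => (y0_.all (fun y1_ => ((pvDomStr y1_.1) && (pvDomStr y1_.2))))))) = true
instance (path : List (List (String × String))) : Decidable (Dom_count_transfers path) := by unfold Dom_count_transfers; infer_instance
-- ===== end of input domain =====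

-- B counts transfers by divide and conquer on index ranges (halves plus one midpoint check)
-- instead of A's left-to-right scan with a running route and counter; same cost, different algorithm.
-- ===== PORT A =====
-- segment["route"]: first-match association lookup; Pre_ guarantees the key is present.
def pvRoute (seg : List (String × String)) : String :=
  ((PySem.Dict.mk seg).get? "route").getD ""

def count_transfers (path : List (List (String × String))) : Int :=
  match path with
  | [] => 0
  | h :: t =>
    (t.foldl (fun (st : Int × String) segment =>
        if pvRoute segment ≠ st.2 then (st.1 + 1, pvRoute segment) else st)
      (0, pvRoute h)).1

-- ===== PORT B =====
-- routes[i]: every recursive call keeps lo < mid < hi ≤ len, so the Python index is in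
-- range; getD with a default is exact on those indices. The fuel argument only makes the
-- halving recursion structural (fuel = routes.length ≥ recursion size hi - lo, so the
-- fuel-0 branch is never the value): same computation as Python's solve(lo, hi).
def pvSolve (routes : List String) (fuel lo hi : Nat) : Int :=
  match fuel with
  | 0 => 0
  | fuel + 1 =>
    if hi - lo < 2 then 0
    else
      let mid := (lo + hi) / 2
      let boundary : Int := if routes.getD mid "" ≠ routes.getD (mid - 1) "" then 1 else 0
      pvSolve routes fuel lo mid + pvSolve routes fuel mid hi + boundary

def count_transfers_alt (path : List (List (String × String))) : Int :=
  let routes := path.map pvRoute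
  pvSolve routes routes.length 0 routes.length

-- ===== PRECONDITION & SPEC =====
-- Pre_ excludes paths with a segment lacking the "route" key, where A (and B) raise KeyError.
def Pre_count_transfers (path : List (List (String × String))) : Prop :=
  ∀ seg ∈ path, ((PySem.Dict.mk seg).get? "route").isSome = true
instance (path : List (List (String × String))) : Decidable (Pre_count_transfers path) := by unfold Pre_count_transfers; infer_instance
def pvWitness_count_transfers : (List (List (String × String))) := [[("route", "12")], [("route", "5")]]
def Spec_count_transfers (path : List (List (String × String))) (out : Int) : Prop := out = count_transfers_alt path
instance (path : List (List (String × String))) (out : Int) : Decidable (Spec_count_transfers path out) := by unfold Spec_count_transfers; infer_instance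

-- ===== CLAIM (what is proved, stated in full; the proofs are below) =====
def Claim_equal_count_transfers : Prop := ∀ (path : List (List (String × String))), Dom_count_transfers path → Pre_count_transfers path → Spec_count_transfers path (count_transfers path)

-- ===== LEMMAS AND PROOFS =====
-- Common specification: number of adjacent differing pairs in a list of routes.
def pvAdj : List String → Int
  | [] => 0
  | [_] => 0
  | a :: b :: t => (if b ≠ a then 1 else 0) + pvAdj (b :: t)

theorem pvAdj_short (l : List String) (h : l.length ≤ 1) : pvAdj l = 0 := by
  match l with
  | [] => rfl
  | [_] => rfl
  | _ :: _ :: _ => simp at h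

theorem pvAdj_append : ∀ (xs ys : List String) (a b : String),
    xs.getLast? = some a → ys.head? = some b →
    pvAdj (xs ++ ys) = pvAdj xs + pvAdj ys + (if b ≠ a then 1 else 0)
  | [], _, _, _, hx, _ => by simp at hx
  | [x], ys, a, b, hx, hy => by
    cases ys with
    | nil => simp at hy
    | cons c t =>
      simp at hx hy
      subst hx; subst hy
      simp [pvAdj]
      ring
  | x1 :: x2 :: xs, ys, a, b, hx, hy => by
    have ih := pvAdj_append (x2 :: xs) ys a b (by simpa using hx) hy
    simp only [List.cons_append, pvAdj] at *
    rw [ih]; ring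

-- A's fold from (c, cur) returns c plus the adjacent-differences count of cur :: rs.
theorem pv_foldA : ∀ (rs : List String) (cur : String) (c : Int),
    (rs.foldl (fun (st : Int × String) r => if r ≠ st.2 then (st.1 + 1, r) else st) (c, cur)).1
      = c + pvAdj (cur :: rs)
  | [], cur, c => by simp [pvAdj]
  | r :: rs, cur, c => by
    by_cases h : r = cur
    · subst h
      simp only [List.foldl_cons, ne_eq, not_true_eq_false]
      rw [if_neg (by simp)]
      rw [pv_foldA rs r c]
      simp [pvAdj]
    · simp only [List.foldl_cons]
      rw [if_pos (by simpa using h)]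
      rw [pv_foldA rs r (c + 1)]
      simp only [pvAdj]
      rw [if_pos (by simpa using h)]
      ring

theorem pv_map_foldl {α β γ : Type} (f : α → β) (g : γ → β → γ) (l : List α) (init : γ) :
    l.foldl (fun acc x => g acc (f x)) init = (l.map f).foldl g init := by
  induction l generalizing init with
  | nil => rfl
  | cons x xs ih => simp [ih]

-- B's divide and conquer computes the adjacent-differences count of the segment.
theorem pvSolve_adj (routes : List String) :
    ∀ (k lo hi : Nat), hi - lo ≤ k → hi ≤ routes.length →
    pvSolve routes k lo hi = pvAdj ((routes.drop lo).take (hi - lo)) := by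
  intro k
  induction k with
  | zero =>
    intro lo hi hk _
    rw [pvSolve, pvAdj_short _ (by simp; omega)]
  | succ k ih =>
    intro lo hi hk hn
    rw [pvSolve]
    by_cases hsmall : hi - lo < 2
    · rw [if_pos hsmall, pvAdj_short _ (by simp; omega)]
    · rw [if_neg hsmall]
      have hmid1 : lo < (lo + hi) / 2 := by omega
      have hmid2 : (lo + hi) / 2 < hi := by omega
      set mid := (lo + hi) / 2 with hmid
      show pvSolve routes k lo mid + pvSolve routes k mid hi +
          (if routes.getD mid "" ≠ routes.getD (mid - 1) "" then (1 : Int) else 0)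
        = pvAdj ((routes.drop lo).take (hi - lo))
      have h1 := ih lo mid (by omega) (by omega)
      have h2 := ih mid hi (by omega) hn
      rw [h1, h2]
      have hsplit : (routes.drop lo).take (hi - lo)
          = (routes.drop lo).take (mid - lo) ++ (routes.drop mid).take (hi - mid) := by
        rw [show hi - lo = (mid - lo) + (hi - mid) by omega, List.take_add, List.drop_drop,
            show lo + (mid - lo) = mid by omega]
      rw [hsplit]
      have hlast : ((routes.drop lo).take (mid - lo)).getLast? = some (routes.getD (mid - 1) "") := by
        have hlen : ((routes.drop lo).take (mid - lo)).length = mid - lo := by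
          simp; omega
        rw [List.getLast?_eq_getElem?, hlen, List.getElem?_take_of_lt (by omega),
            List.getElem?_drop, List.getD_eq_getElem?_getD]
        rw [show lo + (mid - lo - 1) = mid - 1 by omega]
        rw [List.getElem?_eq_getElem (by omega)]
        rfl
      have hhead : ((routes.drop mid).take (hi - mid)).head? = some (routes.getD mid "") := by
        rw [List.head?_eq_getElem?, List.getElem?_take_of_lt (by omega), List.getElem?_drop,
            List.getD_eq_getElem?_getD]
        rw [Nat.add_zero, List.getElem?_eq_getElem (by omega)]
        rfl
      rw [pvAdj_append _ _ _ _ hlast hhead]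

-- ===== VERDICT (by name: the statement is the Claim_ definition above) =====
theorem count_transfers_spec : Claim_equal_count_transfers := by
  intro path _ _
  unfold Spec_count_transfers count_transfers count_transfers_alt
  match path with
  | [] => rfl
  | h :: t =>
    simp only
    rw [pv_map_foldl pvRoute
        (fun (st : Int × String) r => if r ≠ st.2 then (st.1 + 1, r) else st) t (0, pvRoute h)]
    rw [pv_foldA (t.map pvRoute) (pvRoute h) 0]
    rw [pvSolve_adj ((h :: t).map pvRoute) ((h :: t).map pvRoute).length 0
        ((h :: t).map pvRoute).length (by omega) (by omega)]
    simp only [List.drop_zero, Nat.sub_zero, List.map_cons]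
    rw [List.take_length]
    omega
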